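-- pv_equiv track=rewrite | github.com/chae1s/Code-Test | src/algorithm/Programmers/pythonTest/올바른 괄호.py | solution
-- ===== SOURCE A (Python) =====
-- def solution(s):
--     answer = True
--     pare = 0
--     for str in s:
--         if str == '(':
--             pare += 1
--         else:
--             pare -= 1
--
--     return pare == 0
-- ===== SOURCE B (Python) =====
-- def solution(s):
--     # closed form: A's loop adds 1 per '(' and subtracts 1 per other char,
--     # so the balance is 0 iff '(' makes up exactly half the characters.
--     return 2 * s.count('(') == len(s)
-- ===== Notes on version B (the rewrite author's own statement) =====
-- stated objective: faster
-- what changed: Replaces the explicit per-character loop with an accumulator by a one-line closed-form test: twice the count of opening parens equals the string length (A subtracts 1 for every character that is not an opening paren, not only closing ones).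
import Mathlib
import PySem

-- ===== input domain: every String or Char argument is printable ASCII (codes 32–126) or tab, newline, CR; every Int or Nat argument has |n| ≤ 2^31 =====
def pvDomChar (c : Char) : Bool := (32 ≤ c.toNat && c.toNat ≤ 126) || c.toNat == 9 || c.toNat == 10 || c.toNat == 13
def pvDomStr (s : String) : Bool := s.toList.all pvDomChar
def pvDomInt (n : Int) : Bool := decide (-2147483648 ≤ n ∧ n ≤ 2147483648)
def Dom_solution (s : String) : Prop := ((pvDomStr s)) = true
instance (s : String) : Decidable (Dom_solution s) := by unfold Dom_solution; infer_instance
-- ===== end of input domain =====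

-- B replaces A's per-character loop by the closed-form test 2*count('(') == len(s).

-- ===== PORT A =====
def solution (s : String) : Bool :=
  -- answer = True is dead code in A; pare accumulates +1 per '(' and -1 per other char
  let pare : Int := s.toList.foldl (fun pare c => if c == '(' then pare + 1 else pare - 1) 0
  decide (pare = 0)

-- ===== PORT B =====
def solution_alt (s : String) : Bool :=
  decide (2 * (PySem.Str.count s "(" : Int) = PySem.Str.len s)

-- ===== PRECONDITION & SPEC =====
def Spec_solution (s : String) (out : Bool) : Prop := out = solution_alt s
instance (s : String) (out : Bool) : Decidable (Spec_solution s out) := by unfold Spec_solution; infer_instance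

-- ===== CLAIM (what is proved, stated in full; the proofs are below) =====
def Claim_equal_solution : Prop := ∀ (s : String), Dom_solution s → Spec_solution s (solution s)

-- ===== LEMMAS AND PROOFS =====

-- Python's s.count('(') on a single-char pattern is the character count.
theorem count_go_singleton (c : Char) (l : List Char) (acc : Nat) :
    PySem.Chars.count.go [c] l.length l acc = acc + l.count c := by
  induction l generalizing acc with
  | nil => simp [PySem.Chars.count.go]
  | cons h t ih =>
    rw [List.length_cons, PySem.Chars.count.go.eq_def]
    simp only [List.isPrefixOf, Bool.and_true, List.length_cons, List.drop_succ_cons,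
      List.length_nil, List.drop_zero, List.count_cons]
    by_cases hc : c == h
    · have hch : c = h := beq_iff_eq.mp hc
      subst hch
      rw [if_pos hc, ih, if_pos (beq_self_eq_true c)]
      omega
    · have hne : ¬ ((h == c) = true) := fun he => hc (by
        rw [beq_iff_eq] at he ⊢; exact he.symm)
      rw [if_neg hc, ih, if_neg hne]
      omega

theorem count_singleton (c : Char) (l : List Char) :
    PySem.Chars.count l [c] = l.count c := by
  simpa [PySem.Chars.count] using count_go_singleton c l 0

-- A's fold computes 2 * (count of '(') - length.
theorem fold_balance (l : List Char) (a : Int) :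
    l.foldl (fun pare c => if c == '(' then pare + 1 else pare - 1) a
      = a + 2 * (l.count '(' : Int) - l.length := by
  induction l generalizing a with
  | nil => simp
  | cons h t ih =>
    rw [List.foldl_cons]
    by_cases hc : h = '('
    · rw [if_pos (by simp [hc]), ih, hc, List.count_cons_self]
      push_cast [List.length_cons]; ring
    · rw [if_neg (by simp [hc]), ih,
        List.count_cons_of_ne hc]
      push_cast [List.length_cons]; ring

-- ===== VERDICT (by name: the statement is the Claim_ definition above) =====
theorem solution_spec : Claim_equal_solution := by
  intro s _
  unfold Spec_solution solution solution_alt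
  have h1 : PySem.Str.count s "(" = s.toList.count '(' := by
    rw [PySem.Str.count_eq]
    exact count_singleton '(' s.toList
  simp only [fold_balance, h1, PySem.Str.len_eq]
  rw [decide_eq_decide]
  omega
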